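-- pv_equiv track=rewrite | github.com/anonymous-d4b3f/diagbench | code/src/diagbench/probes/p3_intervention.py | _aggregate_objective_trend
-- ===== SOURCE A (Python) =====
-- def _aggregate_objective_trend(signals: list[str]) -> str:
--     if not signals:
--         return "mixed"
--     if all(signal == "better" for signal in signals):
--         return "up"
--     if all(signal == "worse" for signal in signals):
--         return "down"
--     return "mixed"
-- ===== SOURCE B (Python) =====
-- _VERDICT = {"better": "up", "worse": "down"}
--
-- def _aggregate_objective_trend(signals: list[str]) -> str:
--     # single-pass state machine: map each signal to its own verdict and
--     # keep the running consensus; bail out to "mixed" on any disagreement.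
--     trend = None
--     for sig in signals:
--         v = _VERDICT.get(sig, "mixed")
--         if trend is None:
--             trend = v
--         if v != trend or v == "mixed":
--             return "mixed"
--     return trend if trend is not None else "mixed"
-- ===== Notes on version B (the rewrite author's own statement) =====
-- stated objective: alternative
-- what changed: Replaces A's empty-check plus two staged all(...) scans by a single fused pass: each signal is mapped through a verdict table to up/down/mixed and folded into a running consensus accumulator, returning mixed on the first disagreement.
import Mathlib
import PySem

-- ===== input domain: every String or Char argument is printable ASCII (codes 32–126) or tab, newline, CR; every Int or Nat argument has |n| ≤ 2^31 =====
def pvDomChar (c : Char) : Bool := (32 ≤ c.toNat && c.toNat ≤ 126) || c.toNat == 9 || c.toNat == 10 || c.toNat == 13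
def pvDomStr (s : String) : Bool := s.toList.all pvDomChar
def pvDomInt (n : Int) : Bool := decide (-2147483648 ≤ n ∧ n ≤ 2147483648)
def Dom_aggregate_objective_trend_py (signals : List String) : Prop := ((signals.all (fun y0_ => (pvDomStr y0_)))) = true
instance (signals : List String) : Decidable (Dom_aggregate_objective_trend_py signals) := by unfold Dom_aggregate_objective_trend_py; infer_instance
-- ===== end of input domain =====

-- B replaces A's empty-check plus two staged all(...) scans by a single fused pass that maps each
-- signal to its own verdict and folds it into a running consensus accumulator (objective: alternative).


-- ===== PORT A =====
def aggregate_objective_trend_py (signals : List String) : String :=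
  if signals = [] then "mixed"
  else if signals.all (fun signal => signal == "better") then "up"
  else if signals.all (fun signal => signal == "worse") then "down"
  else "mixed"

-- ===== PORT B =====
-- module-level table _VERDICT
def pvVerdictMap : PySem.Dict String String := PySem.Dict.ofList [("better", "up"), ("worse", "down")]

-- the for-loop of B: 'trend' is the running consensus (none before the first signal);
-- the 'return "mixed"' inside the loop is the base case of the early exit.
def pvAggLoop (signals : List String) (trend : Option String) : String :=
  match signals with
  | [] => trend.getD "mixed"          -- return trend if trend is not None else "mixed"
  | signal :: rest =>
    let v := PySem.Dict.getD pvVerdictMap signal "mixed"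
    let t := trend.getD v             -- if trend is None: trend = v
    if v ≠ t ∨ v = "mixed" then "mixed" else pvAggLoop rest (some t)

def aggregate_objective_trend_py_alt (signals : List String) : String :=
  pvAggLoop signals none

-- ===== PRECONDITION & SPEC =====
def Spec_aggregate_objective_trend_py (signals : List String) (out : String) : Prop := out = aggregate_objective_trend_py_alt signals
instance (signals : List String) (out : String) : Decidable (Spec_aggregate_objective_trend_py signals out) := by unfold Spec_aggregate_objective_trend_py; infer_instance

-- ===== CLAIM (what is proved, stated in full; the proofs are below) =====
def Claim_equal_aggregate_objective_trend_py : Prop := ∀ (signals : List String), Dom_aggregate_objective_trend_py signals → Spec_aggregate_objective_trend_py signals (aggregate_objective_trend_py signals)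

-- ===== LEMMAS AND PROOFS =====

-- the verdict table as a three-way branch
theorem pvVerdict_getD (s : String) :
    PySem.Dict.getD pvVerdictMap s "mixed"
      = if s = "better" then "up" else if s = "worse" then "down" else "mixed" := by
  have h : pvVerdictMap = PySem.Dict.mk [("better", "up"), ("worse", "down")] := by decide
  rw [h, PySem.Dict.getD, PySem.Dict.get?_mk_cons, PySem.Dict.get?_mk_cons]
  split_ifs <;> simp_all [PySem.Dict.get?]

-- once the consensus is "up", the loop returns "up" iff every remaining signal is "better"
theorem pvAggLoop_up (l : List String) :
    pvAggLoop l (some "up") = if l.all (fun s => s == "better") then "up" else "mixed" := by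
  induction l with
  | nil => simp [pvAggLoop]
  | cons a rest ih =>
    by_cases ha : a = "better"
    · subst ha; simpa [pvAggLoop, pvVerdict_getD] using ih
    · by_cases hw : a = "worse" <;> simp [pvAggLoop, pvVerdict_getD, ha, hw]

-- once the consensus is "down", the loop returns "down" iff every remaining signal is "worse"
theorem pvAggLoop_down (l : List String) :
    pvAggLoop l (some "down") = if l.all (fun s => s == "worse") then "down" else "mixed" := by
  induction l with
  | nil => simp [pvAggLoop]
  | cons a rest ih =>
    by_cases hw : a = "worse"
    · subst hw; simpa [pvAggLoop, pvVerdict_getD] using ih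
    · by_cases ha : a = "better" <;> simp [pvAggLoop, pvVerdict_getD, ha, hw]

-- ===== VERDICT (by name: the statement is the Claim_ definition above) =====
theorem aggregate_objective_trend_py_spec : Claim_equal_aggregate_objective_trend_py := by
  intro signals _
  unfold Spec_aggregate_objective_trend_py aggregate_objective_trend_py aggregate_objective_trend_py_alt
  rcases signals with _ | ⟨a, rest⟩
  · simp [pvAggLoop]
  · by_cases hb : a = "better"
    · subst hb; simp [pvAggLoop, pvVerdict_getD, pvAggLoop_up]
    · by_cases hw : a = "worse"
      · subst hw; simp [pvAggLoop, pvVerdict_getD, pvAggLoop_down]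
      · simp [pvAggLoop, pvVerdict_getD, hb, hw]
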